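-- pv_equiv track=rewrite | github.com/DataDog/integrations-core | temporal/scripts/update_metrics_map.py | locate_insertion_index
-- ===== SOURCE A (Python) =====
-- from typing import List
--
-- def locate_insertion_index(lines: List[str]) -> int:
--     """Return the index *before* the closing brace of METRIC_MAP."""
--     end_index = None
--     brace_level = 0
--     inside_map = False
--
--     for idx, line in enumerate(lines):
--         if not inside_map and line.lstrip().startswith("METRIC_MAP") and "{" in line:
--             inside_map = True
--             brace_level = line.count("{") - line.count("}")
--             continue
--
--         if inside_map:
--             brace_level += line.count("{") - line.count("}")
--             if brace_level == 0:
--                 # `idx` points to the line containing the closing brace '}'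
--                 end_index = idx
--                 break
--
--     if end_index is None:
--         raise RuntimeError("Could not locate end of METRIC_MAP in metrics.py")
--     return end_index
-- ===== SOURCE B (Python) =====
-- from typing import List
--
-- def locate_insertion_index(lines: List[str]) -> int:
--     """Return the index *before* the closing brace of METRIC_MAP."""
--     n = len(lines)
--     deltas = [line.count("{") - line.count("}") for line in lines]
--     pre = [0]
--     for d in deltas:
--         pre.append(pre[-1] + d)
--     start = next(
--         (i for i, line in enumerate(lines)
--          if line.lstrip().startswith("METRIC_MAP") and "{" in line),
--         None,
--     )
--     if start is not None:
--         end = next((j for j in range(start + 1, n) if pre[j + 1] == pre[start]), None)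
--         if end is not None:
--             return end
--     raise RuntimeError("Could not locate end of METRIC_MAP in metrics.py")
-- ===== Notes on version B (the rewrite author's own statement) =====
-- stated objective: alternative
-- what changed: Replaced the flag-guarded single pass with a running brace accumulator by a precomputed prefix-sum array of per-line brace deltas: the answer is the first index j > start whose prefix value pre[j+1] equals pre[start], found by pure value lookup with no running level and no inside_map flag.
import Mathlib
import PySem

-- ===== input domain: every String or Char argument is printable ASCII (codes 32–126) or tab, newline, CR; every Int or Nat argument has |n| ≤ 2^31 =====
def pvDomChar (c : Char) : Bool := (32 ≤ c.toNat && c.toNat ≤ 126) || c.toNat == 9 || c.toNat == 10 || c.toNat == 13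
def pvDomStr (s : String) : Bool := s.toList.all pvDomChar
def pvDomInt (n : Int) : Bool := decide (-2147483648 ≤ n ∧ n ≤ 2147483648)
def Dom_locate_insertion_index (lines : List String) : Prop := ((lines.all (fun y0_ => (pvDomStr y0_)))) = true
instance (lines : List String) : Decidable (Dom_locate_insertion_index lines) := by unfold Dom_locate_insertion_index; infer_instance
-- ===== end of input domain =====

-- B replaces A's flag-guarded accumulator pass by a precomputed prefix-sum array of per-line
-- brace deltas plus a pure value lookup; on inputs excluded by Pre_ the Python raises
-- RuntimeError and both ports return -1.

-- shared helper: the start-line test and the per-line brace delta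
def pvStartCond (l : String) : Bool :=
  PySem.Str.startswith (PySem.Str.lstrip l) "METRIC_MAP" && PySem.Str.isIn "{" l

def pvDelta (l : String) : Int :=
  (PySem.Str.count l "{" : Int) - (PySem.Str.count l "}" : Int)

-- ===== PORT A =====
-- A's loop: state (idx, brace_level, inside_map); none = fell off the list (RuntimeError)
def locAuxA : List String → Int → Int → Bool → Option Int
  | [], _, _, _ => none
  | l :: rest, idx, brace, inside =>
      if !inside && pvStartCond l then
        locAuxA rest (idx + 1) (pvDelta l) true
      else if inside then
        let b := brace + pvDelta l
        if b = 0 then some idx else locAuxA rest (idx + 1) b inside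
      else
        locAuxA rest (idx + 1) brace inside

def locate_insertion_index (lines : List String) : Int :=
  (locAuxA lines 0 0 false).getD (-1)

-- ===== PORT B =====
-- Source B: start = next((i for i, line in enumerate(lines) if cond), None)
def bFind : List String → Nat → Option Nat
  | [], _ => none
  | l :: rest, i => if pvStartCond l then some i else bFind rest (i + 1)

-- Source B: next((j for j in range(j0, n) if pre[j+1] == pre[start]), None) — pure lookups in pre
def bSearch (pre : List Int) (base : Int) (j n : Nat) : Option Int :=
  if j < n then
    (if pre.getD (j + 1) 0 = base then some (j : Int) else bSearch pre base (j + 1) n)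
  else none
  termination_by n - j

def locate_insertion_index_alt (lines : List String) : Int :=
  let n := lines.length
  let deltas := lines.map pvDelta
  let pre := List.scanl (· + ·) 0 deltas   -- pre[0]=0; pre[k+1]=pre[k]+deltas[k] (the Source B append loop)
  match bFind lines 0 with
  | none => -1
  | some start => (bSearch pre (pre.getD start 0) (start + 1) n).getD (-1)

-- ===== PRECONDITION & SPEC =====
-- Pre_ excludes exactly the inputs where Python A raises RuntimeError: no METRIC_MAP start line,
-- or the brace level never returns to zero after the first start line.
def Pre_locate_insertion_index (lines : List String) : Prop :=
  ∃ i ∈ List.range lines.length,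
    pvStartCond (lines.getD i "") = true ∧
    (∀ k ∈ List.range i, pvStartCond (lines.getD k "") = false) ∧
    ∃ j ∈ List.range lines.length, i < j ∧
      ((List.range (j - i + 1)).map (fun t => pvDelta (lines.getD (i + t) ""))).sum = 0
instance (lines : List String) : Decidable (Pre_locate_insertion_index lines) := by
  unfold Pre_locate_insertion_index; infer_instance

def pvWitness_locate_insertion_index : List String := ["METRIC_MAP = {", "  'a': 1,", "}"]

def Spec_locate_insertion_index (lines : List String) (out : Int) : Prop := out = locate_insertion_index_alt lines
instance (lines : List String) (out : Int) : Decidable (Spec_locate_insertion_index lines out) := by unfold Spec_locate_insertion_index; infer_instance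

-- ===== CLAIM (what is proved, stated in full; the proofs are below) =====
def Claim_equal_locate_insertion_index : Prop := ∀ (lines : List String), Dom_locate_insertion_index lines → Pre_locate_insertion_index lines → Spec_locate_insertion_index lines (locate_insertion_index lines)

-- ===== LEMMAS AND PROOFS =====

-- proof intermediates: A's loop split into find-then-scan form
def pvFindStart : List String → Int → Option (Int × String × List String)
  | [], _ => none
  | l :: rest, i => if pvStartCond l then some (i, l, rest) else pvFindStart rest (i + 1)

def pvScanB : List String → Int → Int → Option Int
  | [], _, _ => none
  | l :: rest, j, level =>
      let lv := level + pvDelta l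
      if lv = 0 then some j else pvScanB rest (j + 1) lv

-- prefix sum of the first k per-line deltas
def preSum (lines : List String) (k : Nat) : Int := ((lines.take k).map pvDelta).sum

theorem locAuxA_inside (lines : List String) :
    ∀ (idx brace : Int), locAuxA lines idx brace true = pvScanB lines idx brace := by
  induction lines with
  | nil => intro idx brace; rfl
  | cons l rest ih =>
      intro idx brace
      simp only [locAuxA, pvScanB, Bool.not_true, Bool.false_and, Bool.false_eq_true,
        if_false, if_true]
      split <;> simp [ih]

theorem locAuxA_outside (lines : List String) :
    ∀ (idx : Int), locAuxA lines idx 0 false =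
      (match pvFindStart lines idx with
       | none => none
       | some (i, l, rest) => pvScanB rest (i + 1) (pvDelta l)) := by
  induction lines with
  | nil => intro idx; rfl
  | cons l rest ih =>
      intro idx
      simp only [locAuxA, pvFindStart, Bool.not_false, Bool.true_and]
      by_cases h : pvStartCond l = true
      · simp [h, locAuxA_inside]
      · simp [h, ih]

theorem bFind_ge (lines : List String) : ∀ (k s : Nat), bFind lines k = some s → k ≤ s := by
  induction lines with
  | nil => intro k s h; simp [bFind] at h
  | cons l rest ih =>
      intro k s h
      simp only [bFind] at h
      split at h
      · injection h with h; omega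
      · have := ih (k + 1) s h; omega

theorem bFind_lt (lines : List String) : ∀ (k s : Nat), bFind lines k = some s → s < k + lines.length := by
  induction lines with
  | nil => intro k s h; simp [bFind] at h
  | cons l rest ih =>
      intro k s h
      simp only [bFind] at h
      split at h
      · injection h with h; simp only [List.length_cons]; omega
      · have := ih (k + 1) s h; simp only [List.length_cons]; omega

-- A's find equals B's find (with the line/rest recovered by indexing)
theorem find_eq (lines : List String) : ∀ (k : Nat),
    pvFindStart lines (k : Int) =
      (match bFind lines k with
       | none => none
       | some s => some ((s : Int), lines.getD (s - k) "", lines.drop (s - k + 1))) := by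
  induction lines with
  | nil => intro k; rfl
  | cons l rest ih =>
      intro k
      simp only [pvFindStart, bFind]
      by_cases h : pvStartCond l = true
      · simp [h]
      · have : ((k : Int) + 1) = ((k + 1 : Nat) : Int) := by push_cast; ring
        rw [if_neg h, if_neg h, this, ih (k + 1)]
        cases hb : bFind rest (k + 1) with
        | none => rfl
        | some s =>
            have hks : k + 1 ≤ s := bFind_ge rest (k + 1) s hb
            have h1 : s - k = (s - (k + 1)) + 1 := by omega
            simp [h1]

theorem scanl_getD (ds : List Int) : ∀ (a : Int) (k : Nat), k ≤ ds.length →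
    (List.scanl (· + ·) a ds).getD k 0 = a + (ds.take k).sum := by
  induction ds with
  | nil =>
      intro a k hk
      have : k = 0 := by simpa using hk
      subst this; simp [List.scanl]
  | cons d rest ih =>
      intro a k hk
      cases k with
      | zero => simp [List.scanl_cons]
      | succ k =>
          simp only [List.scanl_cons, List.getD_cons_succ, List.take_succ_cons, List.sum_cons]
          rw [ih (a + d) k (by simpa using hk)]
          ring

theorem pre_getD (lines : List String) (k : Nat) (hk : k ≤ lines.length) :
    (List.scanl (· + ·) 0 (lines.map pvDelta)).getD k 0 = preSum lines k := by
  rw [scanl_getD (lines.map pvDelta) 0 k (by simpa using hk)]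
  simp [preSum, List.map_take]

theorem preSum_succ (lines : List String) (j : Nat) (hj : j < lines.length) :
    preSum lines (j + 1) = preSum lines j + pvDelta (lines.getD j "") := by
  unfold preSum
  have hjm : j < (List.map pvDelta lines).length := by simpa using hj
  rw [List.map_take, List.map_take, List.take_add_one]
  have h1 : (List.map pvDelta lines)[j]? = some (pvDelta lines[j]) := by
    simp [List.getElem?_map, List.getElem?_eq_getElem hj]
  have h2 : lines[j]? = some lines[j] := List.getElem?_eq_getElem hj
  simp [h1, h2, List.getD]

-- the scan loop over the tail equals the prefix-value lookup
theorem scan_eq_search (lines : List String) (s : Nat) :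
    ∀ (f j : Nat), f = lines.length - j → s < j →
      pvScanB (lines.drop j) (j : Int) (preSum lines j - preSum lines s) =
        bSearch (List.scanl (· + ·) 0 (lines.map pvDelta)) (preSum lines s) j lines.length := by
  intro f
  induction f with
  | zero =>
      intro j hf hs
      have hj : lines.length ≤ j := by omega
      rw [List.drop_eq_nil_of_le hj]
      rw [bSearch]
      simp [pvScanB, Nat.not_lt.mpr hj]
  | succ f ih =>
      intro j hf hs
      have hj : j < lines.length := by omega
      have hdrop : lines.drop j = lines[j] :: lines.drop (j + 1) :=
        List.drop_eq_getElem_cons hj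
      rw [hdrop, bSearch, if_pos hj]
      simp only [pvScanB]
      have hget : lines.getD j "" = lines[j] := by
        simp [List.getD, List.getElem?_eq_getElem hj]
      have hlv : preSum lines j - preSum lines s + pvDelta lines[j] =
          preSum lines (j + 1) - preSum lines s := by
        rw [preSum_succ lines j hj, hget]; ring
      have hpre : (List.scanl (· + ·) 0 (lines.map pvDelta)).getD (j + 1) 0 =
          preSum lines (j + 1) := pre_getD lines (j + 1) (by omega)
      rw [hlv, hpre]
      by_cases hz : preSum lines (j + 1) - preSum lines s = 0
      · have : preSum lines (j + 1) = preSum lines s := by omega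
        simp [this]
      · have hne : ¬ preSum lines (j + 1) = preSum lines s := by omega
        rw [if_neg hz, if_neg hne]
        have : ((j : Int) + 1) = ((j + 1 : Nat) : Int) := by push_cast; ring
        rw [this, ih (j + 1) (by omega) (by omega)]

theorem find_eq0 (lines : List String) :
    pvFindStart lines 0 =
      (match bFind lines 0 with
       | none => none
       | some s => some ((s : Int), lines.getD s "", lines.drop (s + 1))) := by
  have h := find_eq lines 0
  simpa using h

theorem port_eq (lines : List String) :
    locate_insertion_index lines = locate_insertion_index_alt lines := by
  unfold locate_insertion_index locate_insertion_index_alt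
  rw [locAuxA_outside, find_eq0]
  cases hb : bFind lines 0 with
  | none => simp
  | some s =>
      have hs : s < lines.length := by have := bFind_lt lines 0 s hb; omega
      have hseed : pvDelta (lines.getD s "") = preSum lines (s + 1) - preSum lines s := by
        rw [preSum_succ lines s hs]; ring
      have hstep : pvScanB (lines.drop (s + 1)) ((s : Int) + 1) (pvDelta (lines.getD s "")) =
          bSearch (List.scanl (· + ·) 0 (lines.map pvDelta)) (preSum lines s) (s + 1)
            lines.length := by
        have h := scan_eq_search lines s (lines.length - (s + 1)) (s + 1) rfl (by omega)
        have hcast : ((s : Int) + 1) = ((s + 1 : Nat) : Int) := by push_cast; ring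
        rw [hseed, hcast]
        exact h
      simp only []
      rw [hstep, pre_getD lines s (by omega)]

-- ===== VERDICT (by name: the statement is the Claim_ definition above) =====
theorem locate_insertion_index_spec : Claim_equal_locate_insertion_index := by
  intro lines _ _
  exact port_eq lines
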